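-- pv_equiv track=rewrite | github.com/Varun-Patkar/microsoft-exam-prep | .github/agents/quiz_runner.py | limit_preserving_case_studies
-- ===== SOURCE A (Python) =====
-- def limit_preserving_case_studies(questions, limit):
--     """
--     Apply question limit without splitting case-study sequences.
--
--     If the first block is larger than the limit, include it fully so context
--     is not broken.
--     """
--     if limit is None or limit <= 0:
--         return questions
--
--     blocks = []
--     current_case_id = None
--     current_block = []
--
--     for q in questions:
--         case_id = q.get("caseStudyId")
--
--         if case_id:
--             if current_case_id is None or current_case_id == case_id:
--                 current_block.append(q)
--                 current_case_id = case_id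
--             else:
--                 blocks.append(current_block)
--                 current_block = [q]
--                 current_case_id = case_id
--         else:
--             if current_block:
--                 blocks.append(current_block)
--                 current_block = []
--                 current_case_id = None
--             blocks.append([q])
--
--     if current_block:
--         blocks.append(current_block)
--
--     selected = []
--     for block in blocks:
--         if len(selected) + len(block) <= limit:
--             selected.extend(block)
--             continue
--
--         if not selected and len(block) > limit:
--             selected.extend(block)
--         break
--
--     return selected
-- ===== SOURCE B (Python) =====
-- def limit_preserving_case_studies(questions, limit):
--     """Single streaming pass: split one block off the front at a time and
--     select it greedily, stopping at the first block that does not fit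
--     (an oversized first block is taken whole)."""
--     if limit is None or limit <= 0:
--         return questions
--
--     selected = []
--     rest = questions
--     while rest:
--         cid = rest[0].get("caseStudyId")
--         k = 1
--         if cid:
--             while k < len(rest) and rest[k].get("caseStudyId") == cid:
--                 k += 1
--         block, rest = rest[:k], rest[k:]
--         if len(selected) + len(block) <= limit:
--             selected += block
--         elif not selected and len(block) > limit:
--             return block
--         else:
--             break
--     return selected
-- ===== Notes on version B (the rewrite author's own statement) =====
-- stated objective: alternative
-- what changed: Replaces A's two-pass design (a state machine with current_case_id/current_block building a full blocks list, then a second selection loop) by a single streaming pass that splits one case-study run off the front of the remaining list at a time and selects it immediately, with early return/break; no intermediate blocks list is built.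
import Mathlib
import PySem

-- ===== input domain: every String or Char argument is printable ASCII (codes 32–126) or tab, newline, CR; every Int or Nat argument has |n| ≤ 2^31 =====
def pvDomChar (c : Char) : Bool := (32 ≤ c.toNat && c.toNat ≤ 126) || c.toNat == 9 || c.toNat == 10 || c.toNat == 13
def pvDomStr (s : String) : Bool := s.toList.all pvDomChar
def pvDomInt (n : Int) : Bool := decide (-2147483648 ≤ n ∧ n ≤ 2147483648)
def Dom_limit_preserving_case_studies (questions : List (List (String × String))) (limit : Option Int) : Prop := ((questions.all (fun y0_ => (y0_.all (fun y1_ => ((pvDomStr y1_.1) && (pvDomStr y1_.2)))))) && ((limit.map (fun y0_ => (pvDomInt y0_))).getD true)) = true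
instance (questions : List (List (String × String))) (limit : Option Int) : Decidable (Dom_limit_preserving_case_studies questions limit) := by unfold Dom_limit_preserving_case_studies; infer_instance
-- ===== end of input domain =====

-- B replaces A's two-pass block-list construction + selection by one streaming pass that
-- splits case-study runs off the front and selects them immediately (alternative decomposition).

-- ===== PORT A =====
-- Python truthiness of q.get("caseStudyId") (None and "" are falsy)
def pvTruthyA (o : Option String) : Bool :=
  match o with
  | some s => s ≠ ""
  | none => false

-- the body of A's first for-loop (state = (blocks, current_case_id, current_block))
def pvStepA (s : List (List (List (String × String))) × Option String × List (List (String × String)))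
    (q : List (String × String)) :
    List (List (List (String × String))) × Option String × List (List (String × String)) :=
  let caseId := (PySem.Dict.mk q).get? "caseStudyId"
  if pvTruthyA caseId then
    if s.2.1 = none ∨ s.2.1 = caseId then (s.1, caseId, s.2.2 ++ [q])
    else (s.1 ++ [s.2.2], caseId, [q])
  else
    if s.2.2 ≠ [] then (s.1 ++ [s.2.2, [q]], none, [])
    else (s.1 ++ [[q]], s.2.1, s.2.2)

-- A's second for-loop (with break/continue) over the blocks list
def pvSelectA (lim : Int) (selected : List (List (String × String))) :
    List (List (List (String × String))) → List (List (String × String))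
  | [] => selected
  | b :: bs =>
    if (selected.length : Int) + (b.length : Int) ≤ lim then pvSelectA lim (selected ++ b) bs
    else if selected = [] ∧ lim < (b.length : Int) then selected ++ b
    else selected

def limit_preserving_case_studies (questions : List (List (String × String))) (limit : Option Int) : List (List (String × String)) :=
  match limit with
  | none => questions
  | some lim =>
    if lim ≤ 0 then questions
    else
      let st := questions.foldl pvStepA ([], none, [])
      let blocks := if st.2.2 ≠ [] then st.1 ++ [st.2.2] else st.1
      pvSelectA lim [] blocks

-- ===== PORT B =====
-- B's inner while-loop: scan forward while the next question has the same truthy caseStudyId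
def pvRunB (c : String) : List (List (String × String)) → List (List (String × String)) × List (List (String × String))
  | [] => ([], [])
  | q :: rs =>
    if (PySem.Dict.mk q).get? "caseStudyId" == some c then
      let p := pvRunB c rs
      (q :: p.1, p.2)
    else ([], q :: rs)

-- split the block starting at q off the front (k-scan only when cid is truthy)
def pvSplitB (q : List (String × String)) (rs : List (List (String × String))) :
    List (List (String × String)) × List (List (String × String)) :=
  match (PySem.Dict.mk q).get? "caseStudyId" with
  | some c => if c ≠ "" then pvRunB c rs else ([], rs)
  | none => ([], rs)

theorem pvRunB_snd_length (c : String) (l : List (List (String × String))) :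
    (pvRunB c l).2.length ≤ l.length := by
  induction l with
  | nil => simp [pvRunB]
  | cons q rs ih =>
    simp only [pvRunB]
    split
    · simpa using Nat.le_succ_of_le ih
    · simp

theorem pvSplitB_snd_length (q : List (String × String)) (rs : List (List (String × String))) :
    (pvSplitB q rs).2.length ≤ rs.length := by
  unfold pvSplitB
  split
  · split
    · exact pvRunB_snd_length ..
    · simp
  · simp

-- B's outer while-loop: selected accumulator, one block split off and judged per step
def pvGoB (lim : Int) (selected : List (List (String × String))) :
    List (List (String × String)) → List (List (String × String))
  | [] => selected
  | q :: rs =>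
    let pr := pvSplitB q rs
    if (selected.length : Int) + ((q :: pr.1).length : Int) ≤ lim then pvGoB lim (selected ++ (q :: pr.1)) pr.2
    else if selected = [] ∧ lim < ((q :: pr.1).length : Int) then q :: pr.1
    else selected
termination_by l => l.length
decreasing_by exact Nat.lt_succ_of_le (pvSplitB_snd_length ..)

def limit_preserving_case_studies_alt (questions : List (List (String × String))) (limit : Option Int) : List (List (String × String)) :=
  match limit with
  | none => questions
  | some lim =>
    if lim ≤ 0 then questions
    else pvGoB lim [] questions

-- ===== PRECONDITION & SPEC =====
def Spec_limit_preserving_case_studies (questions : List (List (String × String))) (limit : Option Int) (out : List (List (String × String))) : Prop := out = limit_preserving_case_studies_alt questions limit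
instance (questions : List (List (String × String))) (limit : Option Int) (out : List (List (String × String))) : Decidable (Spec_limit_preserving_case_studies questions limit out) := by unfold Spec_limit_preserving_case_studies; infer_instance

-- ===== CLAIM (what is proved, stated in full; the proofs are below) =====
def Claim_equal_limit_preserving_case_studies : Prop := ∀ (questions : List (List (String × String))) (limit : Option Int), Dom_limit_preserving_case_studies questions limit → Spec_limit_preserving_case_studies questions limit (limit_preserving_case_studies questions limit)

-- ===== LEMMAS AND PROOFS =====

-- the block decomposition B's outer loop walks through, as an explicit list (proof device)
def pvBlocksOf : List (List (String × String)) → List (List (List (String × String)))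
  | [] => []
  | q :: rs => (q :: (pvSplitB q rs).1) :: pvBlocksOf (pvSplitB q rs).2
termination_by l => l.length
decreasing_by exact Nat.lt_succ_of_le (pvSplitB_snd_length ..)

-- A's finishing step after its first loop
def pvFinishA (st : List (List (List (String × String))) × Option String × List (List (String × String))) :
    List (List (List (String × String))) :=
  if st.2.2 ≠ [] then st.1 ++ [st.2.2] else st.1

-- fusion: B's single pass equals A's selection loop run over the block decomposition
theorem pvFusion (lim : Int) : ∀ (n : Nat) (qs sel : List (List (String × String))), qs.length ≤ n →
    pvGoB lim sel qs = pvSelectA lim sel (pvBlocksOf qs) := by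
  intro n
  induction n with
  | zero =>
    intro qs sel h
    cases qs with
    | nil => simp [pvGoB, pvBlocksOf, pvSelectA]
    | cons q rs => simp at h
  | succ n ih =>
    intro qs sel h
    cases qs with
    | nil => simp [pvGoB, pvBlocksOf, pvSelectA]
    | cons q rs =>
      rw [pvGoB, pvBlocksOf, pvSelectA]
      have hlen : (pvSplitB q rs).2.length ≤ n :=
        le_trans (pvSplitB_snd_length q rs) (by simpa using Nat.le_of_succ_le_succ h)
      split
      · exact ih _ _ hlen
      · split
        · next hsel => simp [hsel.1]
        · rfl

-- A's first loop produces exactly pvBlocksOf, for both reachable state shapes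
theorem pvGroup : ∀ qs : List (List (String × String)),
    (∀ blocks, pvFinishA (List.foldl pvStepA (blocks, none, ([] : List (List (String × String)))) qs)
      = blocks ++ pvBlocksOf qs) ∧
    (∀ blocks (c : String) block, block ≠ [] → c ≠ "" →
      pvFinishA (List.foldl pvStepA (blocks, some c, block) qs)
      = blocks ++ (block ++ (pvRunB c qs).1) :: pvBlocksOf (pvRunB c qs).2) := by
  intro qs
  induction qs with
  | nil =>
    constructor
    · intro blocks; simp [pvFinishA, pvBlocksOf]
    · intro blocks c block hb _
      simp [pvFinishA, pvRunB, pvBlocksOf, hb]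
  | cons q rs ih =>
    constructor
    · intro blocks
      rw [List.foldl_cons]
      by_cases ht : pvTruthyA ((PySem.Dict.mk q).get? "caseStudyId") = true
      · obtain ⟨d, hd, hdne⟩ : ∃ d, (PySem.Dict.mk q).get? "caseStudyId" = some d ∧ d ≠ "" := by
          revert ht; unfold pvTruthyA
          cases h : (PySem.Dict.mk q).get? "caseStudyId" with
          | none => simp
          | some s => intro hs; exact ⟨s, rfl, by simpa using hs⟩
        have hstep : pvStepA (blocks, none, ([] : List (List (String × String)))) q
            = (blocks, some d, [q]) := by
          simp [pvStepA, pvTruthyA, hd, hdne]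
        rw [hstep, (ih.2) blocks d [q] (by simp) hdne]
        have hblk : pvBlocksOf (q :: rs) = (q :: (pvRunB d rs).1) :: pvBlocksOf (pvRunB d rs).2 := by
          rw [pvBlocksOf]; simp [pvSplitB, hd, hdne]
        rw [hblk]
        simp
      · have hstep : pvStepA (blocks, none, ([] : List (List (String × String)))) q
            = (blocks ++ [[q]], none, []) := by
          simp [pvStepA, ht]
        have hblk : pvBlocksOf (q :: rs) = [q] :: pvBlocksOf rs := by
          rw [pvBlocksOf]
          have hsp : pvSplitB q rs = ([], rs) := by
            revert ht; unfold pvTruthyA pvSplitB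
            cases (PySem.Dict.mk q).get? "caseStudyId" with
            | none => simp
            | some s => simp; intro h; simp [h]
          simp [hsp]
        rw [hstep, (ih.1) (blocks ++ [[q]]), hblk]
        simp
    · intro blocks c block hb hc
      rw [List.foldl_cons]
      by_cases ht : pvTruthyA ((PySem.Dict.mk q).get? "caseStudyId") = true
      · obtain ⟨d, hd, hdne⟩ : ∃ d, (PySem.Dict.mk q).get? "caseStudyId" = some d ∧ d ≠ "" := by
          revert ht; unfold pvTruthyA
          cases h : (PySem.Dict.mk q).get? "caseStudyId" with
          | none => simp
          | some s => intro hs; exact ⟨s, rfl, by simpa using hs⟩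
        by_cases hdc : d = c
        · subst hdc
          have hstep : pvStepA (blocks, some d, block) q = (blocks, some d, block ++ [q]) := by
            simp [pvStepA, pvTruthyA, hd, hdne]
          have hrun : pvRunB d (q :: rs) = (q :: (pvRunB d rs).1, (pvRunB d rs).2) := by
            rw [pvRunB]; simp [hd]
          rw [hstep, (ih.2) blocks d (block ++ [q]) (by simp) hdne, hrun]
          simp
        · have hstep : pvStepA (blocks, some c, block) q = (blocks ++ [block], some d, [q]) := by
            simp [pvStepA, pvTruthyA, hd, hdne]
            exact fun h => hdc h.symm
          have hrun : pvRunB c (q :: rs) = ([], q :: rs) := by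
            rw [pvRunB]; simp [hd, hdc]
          have hblk : pvBlocksOf (q :: rs) = (q :: (pvRunB d rs).1) :: pvBlocksOf (pvRunB d rs).2 := by
            rw [pvBlocksOf]; simp [pvSplitB, hd, hdne]
          rw [hstep, (ih.2) (blocks ++ [block]) d [q] (by simp) hdne, hrun, hblk]
          simp
      · have hstep : pvStepA (blocks, some c, block) q = (blocks ++ [block, [q]], none, []) := by
          simp [pvStepA, ht, hb]
        have hrun : pvRunB c (q :: rs) = ([], q :: rs) := by
          rw [pvRunB]
          revert ht; unfold pvTruthyA
          cases (PySem.Dict.mk q).get? "caseStudyId" with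
          | none => simp
          | some s => simp; intro h; simp [h]; intro h'; exact absurd h'.symm (by simpa [h] using hc.symm)
        have hblk : pvBlocksOf (q :: rs) = [q] :: pvBlocksOf rs := by
          rw [pvBlocksOf]
          have hsp : pvSplitB q rs = ([], rs) := by
            revert ht; unfold pvTruthyA pvSplitB
            cases (PySem.Dict.mk q).get? "caseStudyId" with
            | none => simp
            | some s => simp; intro h; simp [h]
          simp [hsp]
        rw [hstep, (ih.1) (blocks ++ [block, [q]]), hrun, hblk]
        simp

-- ===== VERDICT (by name: the statement is the Claim_ definition above) =====
theorem limit_preserving_case_studies_spec : Claim_equal_limit_preserving_case_studies := by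
  intro questions limit _
  unfold Spec_limit_preserving_case_studies limit_preserving_case_studies limit_preserving_case_studies_alt
  cases limit with
  | none => rfl
  | some lim =>
    by_cases hl : lim ≤ 0
    · simp [hl]
    · simp only [hl, if_false]
      have hA := (pvGroup questions).1 []
      rw [show (if (List.foldl pvStepA ([], none, []) questions).2.2 ≠ [] then
            (List.foldl pvStepA ([], none, []) questions).1 ++ [(List.foldl pvStepA ([], none, []) questions).2.2]
          else (List.foldl pvStepA ([], none, []) questions).1)
          = pvFinishA (List.foldl pvStepA ([], none, []) questions) from rfl, hA]
      rw [pvFusion lim questions.length questions [] le_rfl]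
      simp
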